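-- pv_equiv track=rewrite | github.com/simonen/encoders | binary_to_decimal.py | binary_num
-- ===== SOURCE A (Python) =====
-- def binary_num(number_f):
--     A = []
--     num = int(number_f)
--     while num > 0:
--         A.append(str(num % 2))
--         num = num // 2
--     #Maintain 4bit-sized chunks
--     while len(A) % 4 != 0:
--         A += "0"
--
--     A = A[::-1]
--     binary = ''
--     for chunks in range(0, len(A), 4):
--         binary += "".join(A[chunks:chunks + 4])
--         if len(A[chunks::]) > 4:
--             binary += " "
--     return binary
-- ===== SOURCE B (Python) =====
-- def binary_num(number_f):
--     num = int(number_f)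
--     if num <= 0:
--         return ''
--     s = bin(num)[2:]
--     s = '0' * (-len(s) % 4) + s
--     return ' '.join(s[i:i + 4] for i in range(0, len(s), 4))
-- ===== Notes on version B (the rewrite author's own statement) =====
-- stated objective: simpler
-- what changed: B replaces A's div-loop digit list, pad-while-loop, reversal and manual per-chunk space bookkeeping with bin(num)[2:], an arithmetic left-pad, and a single join over 4-char slices.
import Mathlib
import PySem

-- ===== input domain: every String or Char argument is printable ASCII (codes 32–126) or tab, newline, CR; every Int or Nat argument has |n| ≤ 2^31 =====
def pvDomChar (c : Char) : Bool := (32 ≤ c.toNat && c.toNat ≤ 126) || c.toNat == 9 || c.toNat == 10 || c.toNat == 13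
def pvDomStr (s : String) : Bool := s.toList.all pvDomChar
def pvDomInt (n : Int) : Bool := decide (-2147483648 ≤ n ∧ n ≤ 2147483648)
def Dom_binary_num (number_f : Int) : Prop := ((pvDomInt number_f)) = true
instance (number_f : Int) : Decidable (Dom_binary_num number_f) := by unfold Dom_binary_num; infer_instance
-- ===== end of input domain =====

-- B replaces A's division loop, pad loop, reversal and per-chunk space bookkeeping with a
-- direct MSB-first binary string, an arithmetic left-pad and one join over 4-char slices (objective: simpler).

-- termination facts cited by the recursive definitions below (by name, to keep the bodies small)
lemma pvALoop_meas (num : Int) (h : 0 < num) : (PySem.Int.floordiv num 2).toNat < num.toNat := by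
  rw [PySem.Int.floordiv_eq_ediv_of_pos (by norm_num)]
  omega

-- ===== PORT A =====
-- while num > 0: A.append(str(num % 2)); num = num // 2   (A : list of 1-char strings, as List (List Char))
def pvALoop (num : Int) (A : List (List Char)) : List (List Char) :=
  if h : 0 < num then
    pvALoop (PySem.Int.floordiv num 2) (A ++ [PySem.Int.toChars (PySem.Int.mod num 2)])
  else A
termination_by num.toNat
decreasing_by exact pvALoop_meas num h

-- while len(A) % 4 != 0: A += "0"   ("0" has one char, so one element "0" is appended per step;
-- the loop pads to a multiple of 4, hence runs at most 3 times: 3 steps of fuel make it structural)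
def pvPadGo (fuel : Nat) (A : List (List Char)) : List (List Char) :=
  match fuel with
  | 0 => A
  | fuel + 1 => if A.length % 4 ≠ 0 then pvPadGo fuel (A ++ [['0']]) else A

def pvPadLoop (A : List (List Char)) : List (List Char) := pvPadGo 3 A

def binary_num (number_f : Int) : String :=
  let A0 := pvALoop number_f []          -- num = int(number_f); the division loop
  let A1 := pvPadLoop A0                 -- the padding loop
  let A2 := A1.reverse                   -- A = A[::-1]  (PySem.List.slice?_none_none_neg_one: [::-1] is reverse)
  String.ofList
    ((PySem.List.pyRange 0 (A2.length : Int) 4).foldl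
      (fun binary chunks =>
        let b2 := binary ++ PySem.Chars.join [] (PySem.List.slice A2 (some chunks) (some (chunks + 4)))
        if 4 < (PySem.List.slice A2 (some chunks) none).length then b2 ++ [' '] else b2)
      [])

-- ===== PORT B =====
-- bin(num)[2:] : the MSB-first binary digits of num (ported by hand; exact for num > 0)
def pvBits (n : Nat) : List Char :=
  if h : n = 0 then [] else pvBits (n / 2) ++ [if n % 2 = 1 then '1' else '0']
termination_by n
decreasing_by exact Nat.div_lt_self (Nat.pos_of_ne_zero h) Nat.one_lt_two

def binary_num_alt (number_f : Int) : String :=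
  let num := number_f
  if num ≤ 0 then "" else
    let s0 := pvBits num.toNat                                          -- s = bin(num)[2:]
    let s := List.replicate ((PySem.Int.mod (-(s0.length : Int)) 4).toNat) '0' ++ s0  -- '0' * (-len(s) % 4) + s
    String.ofList (PySem.Chars.join [' ']
      ((PySem.List.pyRange 0 (s.length : Int) 4).map
        (fun i => PySem.List.slice s (some i) (some (i + 4)))))          -- ' '.join(s[i:i+4] …)

-- ===== PRECONDITION & SPEC =====
def Spec_binary_num (number_f : Int) (out : String) : Prop := out = binary_num_alt number_f
instance (number_f : Int) (out : String) : Decidable (Spec_binary_num number_f out) := by unfold Spec_binary_num; infer_instance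

-- ===== CLAIM (what is proved, stated in full; the proofs are below) =====
def Claim_equal_binary_num : Prop := ∀ (number_f : Int), Dom_binary_num number_f → Spec_binary_num number_f (binary_num number_f)

-- ===== LEMMAS AND PROOFS =====

lemma pvChunks_meas {α : Type} (s : List α) (h : ¬ s = []) : (s.drop 4).length < s.length := by
  have : 0 < s.length := List.length_pos_iff.mpr h
  simp [List.length_drop]
  omega

-- the 4-chunks of a char list, front to back
def chunks4 (s : List Char) : List (List Char) :=
  if h : s = [] then [] else s.take 4 :: chunks4 (s.drop 4)
termination_by s.length
decreasing_by exact pvChunks_meas s h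

lemma pvALoop_append (num : Int) (A : List (List Char)) :
    pvALoop num A = A ++ pvALoop num [] := by
  by_cases h : 0 < num
  · rw [show pvALoop num A
        = pvALoop (PySem.Int.floordiv num 2) (A ++ [PySem.Int.toChars (PySem.Int.mod num 2)]) from by
          rw [pvALoop]; simp [h],
        show pvALoop num []
        = pvALoop (PySem.Int.floordiv num 2) ([] ++ [PySem.Int.toChars (PySem.Int.mod num 2)]) from by
          rw [pvALoop]; simp [h]]
    rw [pvALoop_append (PySem.Int.floordiv num 2) (A ++ _),
        pvALoop_append (PySem.Int.floordiv num 2) ([] ++ _)]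
    simp
  · rw [show pvALoop num A = A from by rw [pvALoop]; simp [h],
        show pvALoop num [] = [] from by rw [pvALoop]; simp [h]]
    simp
termination_by num.toNat
decreasing_by
  all_goals (rw [PySem.Int.floordiv_eq_ediv_of_pos (by norm_num)]; omega)

lemma rev_bits (m : Nat) :
    (pvALoop (m : Int) []).reverse = (pvBits m).map (fun c => [c]) := by
  by_cases h : m = 0
  · subst h
    rw [pvALoop, pvBits]; simp
  · have hm2 : m / 2 < m := Nat.div_lt_self (Nat.pos_of_ne_zero h) (by norm_num)
    rw [pvALoop, pvBits]
    have hpos : (0 : Int) < (m : Int) := by exact_mod_cast Nat.pos_of_ne_zero h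
    simp only [hpos, dite_true, h, dite_false]
    have hfd : PySem.Int.floordiv (m : Int) 2 = ((m / 2 : Nat) : Int) := by
      rw [PySem.Int.floordiv_eq_ediv_of_pos (by norm_num)]
      omega
    have hmod : PySem.Int.mod (m : Int) 2 = ((m % 2 : Nat) : Int) := by
      rw [PySem.Int.mod_eq_emod_of_pos (by norm_num)]
      omega
    rw [hfd, hmod, pvALoop_append]
    have hch : PySem.Int.toChars ((m % 2 : Nat) : Int) = [if m % 2 = 1 then '1' else '0'] := by
      rcases Nat.mod_two_eq_zero_or_one m with h2 | h2 <;> rw [h2] <;> decide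
    rw [hch]
    simp only [List.nil_append, List.reverse_append, List.reverse_cons, List.reverse_nil,
      List.nil_append, List.map_append, List.map_cons, List.map_nil]
    rw [rev_bits (m / 2)]
termination_by m
decreasing_by exact hm2

lemma pvPadGo_step (fuel : Nat) (A : List (List Char)) (h : A.length % 4 ≠ 0) :
    pvPadGo (fuel + 1) A = pvPadGo fuel (A ++ [['0']]) := by simp [pvPadGo, h]

lemma pvPadGo_stop (fuel : Nat) (A : List (List Char)) (h : A.length % 4 = 0) :
    pvPadGo (fuel + 1) A = A := by simp [pvPadGo, h]

lemma pvPadLoop_eq (A : List (List Char)) :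
    pvPadLoop A = A ++ List.replicate ((4 - A.length % 4) % 4) [('0' : Char)] := by
  have hr : A.length % 4 = 0 ∨ A.length % 4 = 1 ∨ A.length % 4 = 2 ∨ A.length % 4 = 3 := by omega
  unfold pvPadLoop
  rcases hr with h | h | h | h
  · rw [show (3 : Nat) = 2 + 1 from rfl, pvPadGo_stop 2 A h]
    simp [h]
  · have e1 : (A ++ [['0']]).length % 4 = 2 := by simp; omega
    have e2 : ((A ++ [['0']]) ++ [['0']]).length % 4 = 3 := by simp; omega
    rw [show (3 : Nat) = 2 + 1 from rfl, pvPadGo_step 2 A (by omega),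
        show (2 : Nat) = 1 + 1 from rfl, pvPadGo_step 1 _ (by omega),
        show (1 : Nat) = 0 + 1 from rfl, pvPadGo_step 0 _ (by omega)]
    simp [pvPadGo, h, List.append_assoc, List.replicate_succ]
  · have e1 : (A ++ [['0']]).length % 4 = 3 := by simp; omega
    rw [show (3 : Nat) = 2 + 1 from rfl, pvPadGo_step 2 A (by omega),
        show (2 : Nat) = 1 + 1 from rfl, pvPadGo_step 1 _ (by omega),
        show (1 : Nat) = 0 + 1 from rfl, pvPadGo_stop 0 _ (by simp; omega)]
    simp [h, List.append_assoc, List.replicate_succ]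
  · rw [show (3 : Nat) = 2 + 1 from rfl, pvPadGo_step 2 A (by omega),
        show (2 : Nat) = 1 + 1 from rfl, pvPadGo_stop 1 _ (by simp; omega)]
    simp [h, List.append_assoc, List.replicate_succ]

def idx4 (j k : Nat) : Int := (j : Int) + 4 * (k : Int)

lemma idx4_zero (j : Nat) : idx4 j 0 = ((j : Nat) : Int) := by simp [idx4]

lemma idx4_succ (j : Nat) : idx4 j ∘ Nat.succ = idx4 (j + 4) := by
  funext k
  simp [Function.comp, idx4]
  push_cast
  ring

lemma idx4_succ_comp {α : Type} (g : Int → α) (j : Nat) :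
    (g ∘ idx4 j) ∘ Nat.succ = g ∘ idx4 (j + 4) := by
  rw [Function.comp_assoc, idx4_succ]

lemma rangeStep4 (j L : Nat) (hj : j ≤ L) (hm : (L - j) % 4 = 0) :
    PySem.List.pyRange (j : Int) (L : Int) 4 = (List.range ((L - j) / 4)).map (idx4 j) := by
  rw [PySem.List.pyRange_of_pos _ _ (by norm_num)]
  have hcnt : (if (j : Int) < (L : Int) then (((L : Int) - (j : Int) + 4 - 1) / 4).toNat else 0)
      = (L - j) / 4 := by
    split_ifs with h <;> omega
  rw [hcnt]
  rfl

lemma chunks4_cons (s : List Char) (h : s ≠ []) :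
    chunks4 s = s.take 4 :: chunks4 (s.drop 4) := by
  rw [chunks4]; simp [h]

lemma drop_ne_nil (s : List Char) (j : Nat) (h : j < s.length) : s.drop j ≠ [] := by
  intro hc
  have := congrArg List.length hc
  simp [List.length_drop] at this
  omega

lemma slice_map_sing (s : List Char) (j : Nat) :
    PySem.Chars.join [] (PySem.List.slice (s.map (fun c => [c])) (some (idx4 j 0)) (some (idx4 j 0 + 4)))
      = (s.drop j).take 4 := by
  rw [idx4_zero, show (((j : Nat) : Int) + 4) = (((j : Nat) : Int) + ((4 : Nat) : Int)) by norm_num,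
      PySem.List.slice_natCast_add]
  rw [← List.map_drop, ← List.map_take]
  exact PySem.Chars.join_nil_singletons _

lemma slice_from_len (s : List Char) (j : Nat) :
    (PySem.List.slice (s.map (fun c => [c])) (some (idx4 j 0)) none).length = s.length - j := by
  rw [idx4_zero, PySem.List.slice_from_natCast]
  simp

lemma mapB_go (n : Nat) (s : List Char) (j : Nat) (hlen : j + 4 * n = s.length) :
    ((List.range n).map (idx4 j)).map (fun i => PySem.List.slice s (some i) (some (i + 4)))
      = chunks4 (s.drop j) := by
  induction n generalizing j with
  | zero =>
      have h0 : s.drop j = [] := by apply List.drop_eq_nil_of_le; omega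
      rw [h0, chunks4]
      simp
  | succ n ih =>
      rw [List.range_succ_eq_map, List.map_cons, List.map_cons,
          List.map_map, List.map_map, idx4_succ_comp, ← List.map_map,
          ih (j + 4) (by omega)]
      have hdrop : s.drop j ≠ [] := drop_ne_nil s j (by omega)
      rw [chunks4_cons _ hdrop, List.drop_drop]
      congr 1
      rw [idx4_zero, show (((j : Nat) : Int) + 4) = (((j : Nat) : Int) + ((4 : Nat) : Int)) by norm_num,
          PySem.List.slice_natCast_add]

lemma foldA_go (n : Nat) (s : List Char) (j : Nat) (acc : List Char)
    (hlen : j + 4 * n = s.length) :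
    ((List.range n).map (idx4 j)).foldl
        (fun binary chunks =>
          let b2 := binary ++ PySem.Chars.join []
            (PySem.List.slice (s.map (fun c => [c])) (some chunks) (some (chunks + 4)))
          if 4 < (PySem.List.slice (s.map (fun c => [c])) (some chunks) none).length then b2 ++ [' '] else b2)
        acc
      = acc ++ PySem.Chars.join [' '] (chunks4 (s.drop j)) := by
  induction n generalizing j acc with
  | zero =>
      have h0 : s.drop j = [] := by apply List.drop_eq_nil_of_le; omega
      rw [h0, chunks4]
      simp [PySem.Chars.join, List.intercalate]
  | succ n ih =>
      rw [List.range_succ_eq_map, List.map_cons, List.foldl_cons,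
          List.map_map, idx4_succ j,
          ih (j + 4) _ (by omega)]
      have hdrop : s.drop j ≠ [] := drop_ne_nil s j (by omega)
      rw [chunks4_cons _ hdrop, List.drop_drop]
      simp only [slice_map_sing, slice_from_len]
      by_cases hn : n = 0
      · subst hn
        have hnil : s.drop (j + 4) = [] := by apply List.drop_eq_nil_of_le; omega
        have hcond : ¬ 4 < s.length - j := by omega
        rw [hnil, chunks4]
        simp only [dite_true, hcond, if_false]
        simp [PySem.Chars.join, List.intercalate]
      · have hdrop2 : s.drop (j + 4) ≠ [] := drop_ne_nil s (j + 4) (by omega)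
        have hcond : 4 < s.length - j := by omega
        simp only [hcond, if_true]
        rw [chunks4_cons _ hdrop2, PySem.Chars.join_cons_cons, ← chunks4_cons _ hdrop2]
        simp [List.append_assoc]

lemma padCount (L : Nat) :
    (PySem.Int.mod (-(L : Int)) 4).toNat = (4 - L % 4) % 4 := by
  rw [PySem.Int.mod_eq_emod_of_pos (by norm_num)]
  omega

-- ===== VERDICT (by name: the statement is the Claim_ definition above) =====
theorem binary_num_spec : Claim_equal_binary_num := by
  intro number_f _
  unfold Spec_binary_num binary_num binary_num_alt
  by_cases hpos : number_f ≤ 0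
  · have hnp : ¬ (0 : Int) < number_f := by omega
    have h1 : pvALoop number_f [] = [] := by rw [pvALoop]; simp [hnp]
    have h2 : pvPadLoop ([] : List (List Char)) = [] := by rw [pvPadLoop_eq]; simp
    simp only [h1, h2, List.reverse_nil, List.length_nil, hpos, if_true, Nat.cast_zero]
    rw [PySem.List.pyRange_of_pos _ _ (by norm_num)]
    norm_num
  · replace hpos : 0 < number_f := by omega
    have hnle : ¬ number_f ≤ 0 := by omega
    simp only [hnle, if_false]
    set m : Nat := number_f.toNat with hm
    have hcast : ((m : Nat) : Int) = number_f := by omega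
    set L : Nat := (pvBits m).length with hL
    set k : Nat := (4 - L % 4) % 4 with hk
    have hA0 : pvALoop number_f [] = pvALoop ((m : Nat) : Int) [] := by rw [hcast]
    have hA0len : (pvALoop number_f []).length = L := by
      rw [hA0, ← List.length_reverse, rev_bits]
      simp [hL]
    have hA2 : (pvPadLoop (pvALoop number_f [])).reverse
        = (List.replicate k '0' ++ pvBits m).map (fun c => [c]) := by
      rw [pvPadLoop_eq, List.reverse_append, List.reverse_replicate, hA0len, hA0, rev_bits]
      simp [List.map_append, List.map_replicate, hk]
    set s : List Char := List.replicate k '0' ++ pvBits m with hs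
    have hslen : s.length = k + L := by simp [hs, hL]
    have hBpad : (PySem.Int.mod (-(((pvBits m).length : Nat) : Int)) 4).toNat = k := by
      rw [padCount]
    simp only [hA2, ← hs]
    have hmaplen : (s.map (fun c => [c])).length = s.length := by simp
    rw [hmaplen]
    have hrange := rangeStep4 0 s.length (by omega) (by omega)
    simp only [Nat.cast_zero, Nat.sub_zero] at hrange
    rw [hrange]
    have hfold := foldA_go (s.length / 4) s 0 [] (by omega)
    have hmap := mapB_go (s.length / 4) s 0 (by omega)
    simp only [Nat.cast_zero, List.drop_zero, zero_add] at hfold hmap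
    rw [hfold]
    rw [hBpad, ← hs, hrange, hmap]
    simp
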